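-- pv_equiv track=rewrite | github.com/j-mciver/f20pa-anpr | scripts/anpr.py | call_preprocessing_pipeline
-- ===== SOURCE A (Python) =====
-- def call_preprocessing_pipeline(stages):
--     s_1a = False
--     s_1b = False
--     s_1c = False
--     s_1d = False
--     for stage in stages:
--         if stage == "1a":
--             s_1a = True
--         elif stage == "1b":
--             s_1b = True
--         elif stage == "1c":
--             s_1c = True
--         elif stage == "1d":
--             s_1d = True
--     return s_1a, s_1b, s_1c, s_1d
-- ===== SOURCE B (Python) =====
-- def call_preprocessing_pipeline(stages):
--     weight = {"1a": 1, "1b": 2, "1c": 4, "1d": 8}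
--     mask = sum(weight.get(s, 0) for s in set(stages))
--     return (mask % 2 == 1, mask // 2 % 2 == 1, mask // 4 % 2 == 1, mask // 8 % 2 == 1)
-- ===== Notes on version B (the rewrite author's own statement) =====
-- stated objective: alternative
-- what changed: Replaces the four-flag elif loop by encoding presence as an integer bitmask: sum the weights 1/2/4/8 of the distinct stages present and decode each flag by arithmetic bit extraction.
import Mathlib
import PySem

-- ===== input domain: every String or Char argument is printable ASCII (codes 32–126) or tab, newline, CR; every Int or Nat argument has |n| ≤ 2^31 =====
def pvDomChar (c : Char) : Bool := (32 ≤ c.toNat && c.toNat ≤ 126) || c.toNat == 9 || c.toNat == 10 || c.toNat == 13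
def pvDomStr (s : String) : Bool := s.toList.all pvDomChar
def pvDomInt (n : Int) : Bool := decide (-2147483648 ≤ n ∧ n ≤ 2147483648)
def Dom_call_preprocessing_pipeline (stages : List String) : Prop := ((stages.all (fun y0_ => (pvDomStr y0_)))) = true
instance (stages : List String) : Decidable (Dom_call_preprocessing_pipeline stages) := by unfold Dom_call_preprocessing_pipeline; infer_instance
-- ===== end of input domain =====

-- B encodes presence as a single integer bitmask (weights 1/2/4/8 summed over the distinct stages) and decodes each flag arithmetically; objective: alternative.

-- ===== PORT A =====
-- A's loop body: the elif chain over one stage, flags as the 4-tuple components.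
def pvStepA (st : Bool × Bool × Bool × Bool) (stage : String) : Bool × Bool × Bool × Bool :=
  if stage == "1a" then (true, st.2.1, st.2.2.1, st.2.2.2)
  else if stage == "1b" then (st.1, true, st.2.2.1, st.2.2.2)
  else if stage == "1c" then (st.1, st.2.1, true, st.2.2.2)
  else if stage == "1d" then (st.1, st.2.1, st.2.2.1, true)
  else st

-- A's loop over `stages`, in the same branch order.
def call_preprocessing_pipeline (stages : List String) : Bool × Bool × Bool × Bool :=
  stages.foldl pvStepA (false, false, false, false)

-- ===== PORT B =====
-- the `weight` dict literal of Source B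
def pvWeight : PySem.Dict String Int :=
  PySem.Dict.ofList [("1a", 1), ("1b", 2), ("1c", 4), ("1d", 8)]

-- mask = sum(weight.get(s, 0) for s in set(stages)); then arithmetic bit decoding
def call_preprocessing_pipeline_alt (stages : List String) : Bool × Bool × Bool × Bool :=
  let mask : Int := ((PySem.Set.ofList stages).map (fun s => pvWeight.getD s 0)).sum
  (PySem.Int.mod mask 2 == 1,
   PySem.Int.mod (PySem.Int.floordiv mask 2) 2 == 1,
   PySem.Int.mod (PySem.Int.floordiv mask 4) 2 == 1,
   PySem.Int.mod (PySem.Int.floordiv mask 8) 2 == 1)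

-- ===== PRECONDITION & SPEC =====
def Spec_call_preprocessing_pipeline (stages : List String) (out : Bool × Bool × Bool × Bool) : Prop := out = call_preprocessing_pipeline_alt stages
instance (stages : List String) (out : Bool × Bool × Bool × Bool) : Decidable (Spec_call_preprocessing_pipeline stages out) := by unfold Spec_call_preprocessing_pipeline; infer_instance

-- ===== CLAIM =====
def Claim_equal_call_preprocessing_pipeline : Prop := ∀ (stages : List String), Dom_call_preprocessing_pipeline stages → Spec_call_preprocessing_pipeline stages (call_preprocessing_pipeline stages)

-- ===== LEMMAS AND PROOFS =====

-- A's loop result starting from any state: each flag is its start value OR-ed with membership.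
theorem pvLoop_char (stages : List String) (a b c d : Bool) :
    stages.foldl pvStepA (a, b, c, d)
    = (a || stages.contains "1a", b || stages.contains "1b",
       c || stages.contains "1c", d || stages.contains "1d") := by
  induction stages generalizing a b c d with
  | nil => simp
  | cons x xs ih =>
    rw [List.foldl_cons]
    by_cases h1 : x = "1a"
    · subst h1
      rw [show pvStepA (a, b, c, d) "1a" = (true, b, c, d) from rfl, ih]; simp
    · by_cases h2 : x = "1b"
      · subst h2
        rw [show pvStepA (a, b, c, d) "1b" = (a, true, c, d) from rfl, ih]; simp
      · by_cases h3 : x = "1c"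
        · subst h3
          rw [show pvStepA (a, b, c, d) "1c" = (a, b, true, d) from rfl, ih]; simp
        · by_cases h4 : x = "1d"
          · subst h4
            rw [show pvStepA (a, b, c, d) "1d" = (a, b, c, true) from rfl, ih]; simp
          · rw [show pvStepA (a, b, c, d) x = (a, b, c, d) from by
                simp [pvStepA, h1, h2, h3, h4], ih]
            simp [Ne.symm h1, Ne.symm h2, Ne.symm h3, Ne.symm h4]

-- the weight of one stage as a conditional
theorem pvWeight_getD (s : String) :
    pvWeight.getD s 0
    = (if s = "1a" then 1 else if s = "1b" then 2 else if s = "1c" then 4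
       else if s = "1d" then 8 else 0) := by
  have hmk : pvWeight = PySem.Dict.mk [("1a", 1), ("1b", 2), ("1c", 4), ("1d", 8)] := by decide
  rw [hmk]
  by_cases h1 : s = "1a"
  · subst h1; decide
  by_cases h2 : s = "1b"
  · subst h2; decide
  by_cases h3 : s = "1c"
  · subst h3; decide
  by_cases h4 : s = "1d"
  · subst h4; decide
  simp [PySem.Dict.getD, Ne.symm h1, Ne.symm h2, Ne.symm h3,
        Ne.symm h4, h1, h2, h3, h4, PySem.Dict.get?]

-- the mask over a duplicate-free list decomposes into the four presence bits
theorem pvMask_char (l : List String) (h : l.Nodup) :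
    (l.map (fun s => pvWeight.getD s 0)).sum
    = (if "1a" ∈ l then (1:Int) else 0) + (if "1b" ∈ l then 2 else 0)
      + (if "1c" ∈ l then 4 else 0) + (if "1d" ∈ l then 8 else 0) := by
  induction l with
  | nil => simp
  | cons x xs ih =>
    have hx : x ∉ xs := (List.nodup_cons.mp h).1
    have ih' := ih (List.nodup_cons.mp h).2
    rw [List.map_cons, List.sum_cons, ih', pvWeight_getD]
    by_cases h1 : x = "1a"
    · subst h1; simp [List.mem_cons, hx]; ring
    by_cases h2 : x = "1b"
    · subst h2; simp [List.mem_cons, hx]; ring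
    by_cases h3 : x = "1c"
    · subst h3; simp [List.mem_cons, hx]; ring
    by_cases h4 : x = "1d"
    · subst h4; simp [List.mem_cons, hx]; ring
    simp [List.mem_cons, h1, h2, h3, h4, Ne.symm h1, Ne.symm h2, Ne.symm h3, Ne.symm h4]

-- ===== VERDICT =====
theorem call_preprocessing_pipeline_spec : Claim_equal_call_preprocessing_pipeline := by
  intro stages _
  show _ = _
  rw [call_preprocessing_pipeline, call_preprocessing_pipeline_alt, pvLoop_char]
  rw [pvMask_char _ (PySem.Set.nodup_ofList stages)]
  have hmem : ∀ s : String, (s ∈ PySem.Set.ofList stages) = (stages.contains s = true) := by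
    intro s; simp [PySem.Set.mem_ofList, List.contains_eq_mem]
  by_cases ha : stages.contains "1a" <;> by_cases hb : stages.contains "1b" <;>
    by_cases hc : stages.contains "1c" <;> by_cases hd : stages.contains "1d" <;>
    simp only [hmem, ha, hb, hc, hd, if_true, Bool.false_or] <;>
    norm_num [ha, hb, hc, hd]
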